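-- pv_equiv track=rewrite | github.com/xiye17/StructuredRegex | toolkit/postprocess.py | map_tokens_with_consts
-- ===== SOURCE A (Python) =====
-- def map_tokens_with_consts(tokens, consts, ints):
--     maps = []
--     tokens_bak = tokens[:]
--     quoated_tokens = []
--     symbol_tokens = []
--     for const in consts:
--         if const[0] == "tok":
--             if const[1] == "a" or const[1] == "." or const[1] == ",":
--                 continue
--             if const[1].isdigit():
--                 # overlapping
--                 if const[1] in ints:
--                     continue
--
--         target = const[1]
--         quoated_tokens = []
--         for i, tok in enumerate(tokens):
--             if tok == target:
--                 quoated_tokens.append('"{}"'.format(target))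
--             else:
--                 quoated_tokens.append(tok)
--         tokens = quoated_tokens
--     if not quoated_tokens:
--         quoated_tokens = tokens[:]
--
--     c_id = 0
--     for const in consts:
--         target = const[1]
--         symbol = "const{}".format(c_id)
--         symbol_tokens = []
--         flag_mapped = False
--         for i, tok in enumerate(quoated_tokens):
--             if tok == '"{}"'.format(target):
--                 symbol_tokens.append(symbol)
--                 flag_mapped = True
--             else:
--                 symbol_tokens.append(tok)
--         if flag_mapped:
--             maps.append((symbol, target))
--             c_id += 1
--         quoated_tokens = symbol_tokens
--
--     if not symbol_tokens:
--         symbol_tokens = quoated_tokens[:]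
--     # leftout free consts
--     free_consts = []
--     for tok in symbol_tokens:
--         if tok[0] == '"' and tok[-1] == '"' and len(tok) > 2:
--             if tok[1:-1] not in free_consts:
--                 free_consts.append(tok[1:-1])
--     map_before = maps[:]
--     symbol_descp = " ".join(symbol_tokens)
--     for fcons in free_consts:
--         symbol = "const{}".format(c_id)
--         symbol_descp = symbol_descp.replace('"{}"'.format(fcons), symbol)
--         maps.append((symbol, fcons))
--         c_id += 1
--     symbol_tokens = symbol_descp.split(" ")
--     return symbol_tokens, maps
-- ===== SOURCE B (Python) =====
-- def map_tokens_with_consts(tokens, consts, ints):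
--     # simpler: build the quote/symbol tables once, then rewrite in single passes
--     def _skip(const):
--         return const[0] == "tok" and (
--             const[1] in ("a", ".", ",")
--             or (const[1].isdigit() and const[1] in ints))
--
--     quote_targets = [c[1] for c in consts if not _skip(c)]
--
--     def _quote(tok):
--         for tgt in quote_targets:
--             if tok == tgt:
--                 tok = '"{}"'.format(tgt)
--         return tok
--
--     quoted = [_quote(t) for t in tokens]
--
--     # assign const ids in const order, only to quoted targets actually present
--     table = {}
--     maps = []
--     for const in consts:
--         q = '"{}"'.format(const[1])
--         if q in quoted and q not in table:
--             table[q] = "const{}".format(len(maps))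
--             maps.append((table[q], const[1]))
--     symbol_tokens = [table.get(t, t) for t in quoted]
--
--     # leftover free consts: same join/replace/split stage as the original
--     free_consts = []
--     for tok in symbol_tokens:
--         if len(tok) > 2 and tok[0] == '"' and tok[-1] == '"' and tok[1:-1] not in free_consts:
--             free_consts.append(tok[1:-1])
--     descp = " ".join(symbol_tokens)
--     for fcons in free_consts:
--         symbol = "const{}".format(len(maps))
--         descp = descp.replace('"{}"'.format(fcons), symbol)
--         maps.append((symbol, fcons))
--     return descp.split(" "), maps
-- ===== Notes on version B (the rewrite author's own statement) =====
-- stated objective: simpler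
-- what changed: B quotes each token with one per-token fold, builds the const-id table in a single pass over consts and rewrites the token list once via a dict lookup, instead of A's per-const full rebuilds of the token list in both phases
import Mathlib
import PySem

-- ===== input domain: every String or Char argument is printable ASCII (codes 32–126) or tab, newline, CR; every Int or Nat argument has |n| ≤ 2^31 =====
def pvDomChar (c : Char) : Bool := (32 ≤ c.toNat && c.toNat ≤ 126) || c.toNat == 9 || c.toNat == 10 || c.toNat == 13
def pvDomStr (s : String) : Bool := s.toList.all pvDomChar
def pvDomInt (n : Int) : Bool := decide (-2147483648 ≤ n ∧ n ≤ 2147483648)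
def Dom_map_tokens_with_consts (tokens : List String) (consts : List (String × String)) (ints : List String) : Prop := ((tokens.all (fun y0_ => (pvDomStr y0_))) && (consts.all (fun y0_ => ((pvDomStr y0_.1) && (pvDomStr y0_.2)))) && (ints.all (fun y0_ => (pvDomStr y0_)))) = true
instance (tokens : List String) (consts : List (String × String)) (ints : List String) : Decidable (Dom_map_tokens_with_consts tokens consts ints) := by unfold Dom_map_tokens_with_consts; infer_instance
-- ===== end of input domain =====

-- B replaces A's per-const full rescans by one symbol table built in a single pass plus one rewrite pass (objective: simpler).
-- '"{}"'.format(s)  (shared formatting helper)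
def pvQuote (s : String) : String := "\"" ++ s ++ "\""

-- ===== PORT A =====
-- the two 'continue' conditions of A's first loop, with A's nesting
def pvSkipA (ints : List String) (c : String × String) : Bool :=
  if c.1 == "tok" then
    if c.2 == "a" || c.2 == "." || c.2 == "," then true
    else if PySem.Str.strIsdigit c.2 then ints.contains c.2
    else false
  else false

-- port of A; where Python A raises IndexError (tok[0] on an empty token, see Pre_) the
-- free-const test below is simply false instead.
def map_tokens_with_consts (tokens : List String) (consts : List (String × String)) (ints : List String) : List String × (List (String × String)) :=
  -- phase 1: quote matching const tokens (state: tokens, quoated_tokens)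
  let st1 := consts.foldl (fun (st : List String × List String) c =>
      if pvSkipA ints c then st
      else
        let q := st.1.foldl (fun acc tok => acc ++ [if tok == c.2 then pvQuote c.2 else tok]) []
        (q, q)) (tokens, [])
  let quoated := if st1.2.isEmpty then st1.1 else st1.2
  -- phase 2: replace quoted targets by const symbols (state: c_id, maps, quoated, symbol_tokens)
  let st2 := consts.foldl (fun (st : Int × List (String × String) × List String × List String) c =>
      let symbol := "const" ++ PySem.Int.toStr st.1
      let p := st.2.2.1.foldl (fun (p : List String × Bool) tok =>
          if tok == pvQuote c.2 then (p.1 ++ [symbol], true) else (p.1 ++ [tok], p.2)) ([], false)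
      if p.2 then (st.1 + 1, st.2.1 ++ [(symbol, c.2)], p.1, p.1)
      else (st.1, st.2.1, p.1, p.1)) (0, ([] : List (String × String)), quoated, [])
  let symbol_tokens := if st2.2.2.2.isEmpty then st2.2.2.1 else st2.2.2.2
  -- leftout free consts
  let free_consts := symbol_tokens.foldl (fun acc tok =>
      if (PySem.Str.pyGet? tok 0 == some '"') && (PySem.Str.pyGet? tok (-1) == some '"') && decide (2 < PySem.Str.len tok) then
        if acc.contains (PySem.Str.slice tok (some 1) (some (-1))) then acc
        else acc ++ [PySem.Str.slice tok (some 1) (some (-1))]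
      else acc) []
  let st3 := free_consts.foldl (fun (st : String × List (String × String) × Int) f =>
      let symbol := "const" ++ PySem.Int.toStr st.2.2
      (PySem.Str.replace st.1 (pvQuote f) symbol, st.2.1 ++ [(symbol, f)], st.2.2 + 1))
      (PySem.Str.join " " symbol_tokens, st2.2.1, st2.1)
  ((PySem.Str.split? st3.1 " ").getD [], st3.2.1)

-- ===== PORT B =====
-- B's _skip helper (single boolean, tuple membership)
def pvSkipB (ints : List String) (c : String × String) : Bool :=
  c.1 == "tok" && (["a", ".", ","].contains c.2 || (PySem.Str.strIsdigit c.2 && ints.contains c.2))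

def map_tokens_with_consts_alt (tokens : List String) (consts : List (String × String)) (ints : List String) : List String × (List (String × String)) :=
  let targets := (consts.filter (fun c => !(pvSkipB ints c))).map (·.2)
  let quoted := tokens.map (fun t => targets.foldl (fun t tgt => if t == tgt then pvQuote tgt else t) t)
  -- assign const ids in const order, only to quoted targets actually present
  let tm := consts.foldl (fun (st : PySem.Dict String String × List (String × String)) c =>
      let q := pvQuote c.2
      if quoted.contains q && !(st.1.contains q) then
        let sym := "const" ++ PySem.Int.toStr ((st.2.length : Nat) : Int)
        (st.1.insert q sym, st.2 ++ [(sym, c.2)])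
      else st) (PySem.Dict.empty, [])
  let symbol_tokens := quoted.map (fun t => tm.1.getD t t)
  -- leftover free consts, same join/replace/split stage as the original
  let free_consts := symbol_tokens.foldl (fun acc tok =>
      if decide (2 < PySem.Str.len tok) && (PySem.Str.pyGet? tok 0 == some '"') && (PySem.Str.pyGet? tok (-1) == some '"')
          && !(acc.contains (PySem.Str.slice tok (some 1) (some (-1)))) then
        acc ++ [PySem.Str.slice tok (some 1) (some (-1))]
      else acc) []
  let st3 := free_consts.foldl (fun (st : String × List (String × String)) f =>
      let sym := "const" ++ PySem.Int.toStr ((st.2.length : Nat) : Int)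
      (PySem.Str.replace st.1 (pvQuote f) sym, st.2 ++ [(sym, f)]))
      (PySem.Str.join " " symbol_tokens, tm.2)
  ((PySem.Str.split? st3.1 " ").getD [], st3.2)

-- ===== PRECONDITION & SPEC =====
-- Pre_ excludes inputs holding an empty-string token not quoted by any const with empty target:
-- there Python A raises IndexError at tok[0] in the free-const scan.
def Pre_map_tokens_with_consts (tokens : List String) (consts : List (String × String)) (ints : List String) : Prop :=
  "" ∈ tokens → ∃ c ∈ consts, c.2 = ""
instance (tokens : List String) (consts : List (String × String)) (ints : List String) : Decidable (Pre_map_tokens_with_consts tokens consts ints) := by unfold Pre_map_tokens_with_consts; infer_instance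

def pvWitness_map_tokens_with_consts : List String × (List (String × String)) × List String :=
  (["the", "cat", "12"], [("tok", "cat"), ("tok", "12")], ["12"])

def Spec_map_tokens_with_consts (tokens : List String) (consts : List (String × String)) (ints : List String) (out : List String × (List (String × String))) : Prop := out = map_tokens_with_consts_alt tokens consts ints
instance (tokens : List String) (consts : List (String × String)) (ints : List String) (out : List String × (List (String × String))) : Decidable (Spec_map_tokens_with_consts tokens consts ints out) := by unfold Spec_map_tokens_with_consts; infer_instance

-- ===== CLAIM (what is proved, stated in full; the proofs are below) =====
def Claim_equal_map_tokens_with_consts : Prop := ∀ (tokens : List String) (consts : List (String × String)) (ints : List String), Dom_map_tokens_with_consts tokens consts ints → Pre_map_tokens_with_consts tokens consts ints → Spec_map_tokens_with_consts tokens consts ints (map_tokens_with_consts tokens consts ints)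
-- ===== LEMMAS AND PROOFS =====


-- head character of a string (proof helper)
def pvHead (s : String) : Option Char := s.toList.head?

theorem pvHead_quote (s : String) : pvHead (pvQuote s) = some '"' := by
  simp [pvHead, pvQuote]

theorem pvHead_sym (x : String) : pvHead ("const" ++ x) = some 'c' := by
  simp [pvHead]

theorem pvSkip_eq (ints : List String) (c : String × String) :
    pvSkipA ints c = pvSkipB ints c := by
  simp only [pvSkipA, pvSkipB, List.contains_cons, List.contains_nil]
  by_cases h1 : c.1 == "tok" <;> by_cases h2 : c.2 == "a" <;> by_cases h3 : c.2 == "." <;>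
    by_cases h4 : c.2 == "," <;> by_cases h5 : PySem.Str.strIsdigit c.2 <;>
    simp_all [BEq.comm]

-- characterisation of a lookup with default: it returns the quoted string q
-- iff the key is q itself and q is unassigned (all stored values start with 'c', q with '"')
theorem pv_gd_eq_q (d : PySem.Dict String String) (q t : String)
    (hd : ∀ k v, d.get? k = some v → pvHead v = some 'c') (hq : pvHead q = some '"') :
    d.getD t t = q ↔ (t = q ∧ d.get? q = none) := by
  rw [PySem.Dict.getD_eq_get?_getD]
  cases h : d.get? t with
  | none =>
    simp only [Option.getD_none]
    constructor
    · rintro rfl; exact ⟨rfl, h⟩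
    · rintro ⟨rfl, _⟩; rfl
  | some v =>
    simp only [Option.getD_some]
    constructor
    · rintro rfl
      have := hd t v h
      rw [hq] at this; cases this
    · rintro ⟨rfl, hn⟩
      rw [h] at hn; cases hn

-- ===== phase 1 =====

theorem pv_phase1 (ints : List String) :
    ∀ (cs : List (String × String)) (L q0 : List String), (q0 = [] ∨ q0 = L) →
    (cs.foldl (fun (st : List String × List String) c =>
        if pvSkipA ints c then st
        else
          let q := st.1.foldl (fun acc tok => acc ++ [if tok == c.2 then pvQuote c.2 else tok]) []
          (q, q)) (L, q0))
      = (L.map (fun t => cs.foldl (fun t c => if pvSkipA ints c then t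
            else if t == c.2 then pvQuote c.2 else t) t),
         (cs.foldl (fun (st : List String × List String) c =>
        if pvSkipA ints c then st
        else
          let q := st.1.foldl (fun acc tok => acc ++ [if tok == c.2 then pvQuote c.2 else tok]) []
          (q, q)) (L, q0)).2)
      ∧ ((cs.foldl (fun (st : List String × List String) c =>
        if pvSkipA ints c then st
        else
          let q := st.1.foldl (fun acc tok => acc ++ [if tok == c.2 then pvQuote c.2 else tok]) []
          (q, q)) (L, q0)).2 = [] ∨
        (cs.foldl (fun (st : List String × List String) c =>
        if pvSkipA ints c then st
        else
          let q := st.1.foldl (fun acc tok => acc ++ [if tok == c.2 then pvQuote c.2 else tok]) []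
          (q, q)) (L, q0)).2
        = L.map (fun t => cs.foldl (fun t c => if pvSkipA ints c then t
            else if t == c.2 then pvQuote c.2 else t) t)) := by
  intro cs
  induction cs with
  | nil => intro L q0 h; refine ⟨by simp, ?_⟩; simpa using h
  | cons c cs ih =>
    intro L q0 h
    by_cases hs : pvSkipA ints c
    · have := ih L q0 h
      simp only [List.foldl_cons, hs, if_true]
      simpa [hs] using this
    · have hmap : L.foldl (fun acc tok => acc ++ [if tok == c.2 then pvQuote c.2 else tok]) ([] : List String)
          = L.map (fun tok => if tok == c.2 then pvQuote c.2 else tok) := by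
        simpa using PySem.List.foldl_append_singleton_eq_map
          (fun tok => if tok == c.2 then pvQuote c.2 else tok) L []
      have := ih (L.map (fun tok => if tok == c.2 then pvQuote c.2 else tok))
        (L.map (fun tok => if tok == c.2 then pvQuote c.2 else tok)) (Or.inr rfl)
      simp only [List.foldl_cons, hs, hmap, List.map_map] at this ⊢
      simpa [hs, Function.comp] using this

theorem pv_targets (ints : List String) :
    ∀ (cs : List (String × String)) (t : String),
    cs.foldl (fun t c => if pvSkipA ints c then t else if t == c.2 then pvQuote c.2 else t) t
      = ((cs.filter (fun c => !(pvSkipB ints c))).map (·.2)).foldl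
          (fun t tgt => if t == tgt then pvQuote tgt else t) t := by
  intro cs
  induction cs with
  | nil => intro t; rfl
  | cons c cs ih =>
    intro t
    have hpred : (fun c => !(pvSkipB ints c)) = (fun c => !(pvSkipA ints c)) := by
      funext c; rw [pvSkip_eq]
    by_cases hs : pvSkipA ints c
    · simp only [List.foldl_cons, List.filter_cons, hpred, hs, if_true]
      simp only [Bool.not_true, Bool.false_eq_true, if_false]
      simpa [hpred] using ih t
    · simp only [List.foldl_cons, List.filter_cons, hpred, hs]
      simp only [Bool.not_false, if_true, List.map_cons, List.foldl_cons]
      simpa [hpred] using ih (if t == c.2 then pvQuote c.2 else t)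

-- ===== phase 2 =====

theorem pv_pairfold (q sym : String) :
    ∀ (L : List String) (acc : List String) (b : Bool),
    L.foldl (fun (p : List String × Bool) tok =>
        if tok == q then (p.1 ++ [sym], true) else (p.1 ++ [tok], p.2)) (acc, b)
      = (acc ++ L.map (fun t => if t == q then sym else t), b || L.any (fun t => t == q)) := by
  intro L
  induction L with
  | nil => intro acc b; simp
  | cons x L ih =>
    intro acc b
    rw [List.foldl_cons]
    by_cases hx : (x == q) = true
    · have hstep : (if (x == q) then (acc ++ [sym], true) else (acc ++ [x], b))
          = (acc ++ [sym], true) := by simp [hx]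
      rw [hstep, ih]; simp [hx]
      exact fun h => absurd (beq_iff_eq.mp hx) h
    · have hstep : (if (x == q) then (acc ++ [sym], true) else (acc ++ [x], b))
          = (acc ++ [x], b) := by simp [hx]
      rw [hstep, ih]; simp [hx, List.any_cons]
      exact fun h => absurd h (by simpa using hx)

theorem pv_phase2 (P1 : List String) :
    ∀ (cs : List (String × String)) (d : PySem.Dict String String)
      (maps : List (String × String)) (s0 : List String),
    (∀ k v, d.get? k = some v → pvHead v = some 'c') →
    (cs.foldl (fun (st : Int × List (String × String) × List String × List String) c =>
        let symbol := "const" ++ PySem.Int.toStr st.1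
        let p := st.2.2.1.foldl (fun (p : List String × Bool) tok =>
            if tok == pvQuote c.2 then (p.1 ++ [symbol], true) else (p.1 ++ [tok], p.2)) ([], false)
        if p.2 then (st.1 + 1, st.2.1 ++ [(symbol, c.2)], p.1, p.1)
        else (st.1, st.2.1, p.1, p.1))
      ((maps.length : Int), maps, P1.map (fun t => d.getD t t), s0))
      = (let rb := cs.foldl (fun (st : PySem.Dict String String × List (String × String)) c =>
            let q := pvQuote c.2
            if P1.contains q && !(st.1.contains q) then
              let sym := "const" ++ PySem.Int.toStr ((st.2.length : Nat) : Int)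
              (st.1.insert q sym, st.2 ++ [(sym, c.2)])
            else st) (d, maps)
         ((rb.2.length : Int), rb.2, P1.map (fun t => rb.1.getD t t),
          if cs.isEmpty then s0 else P1.map (fun t => rb.1.getD t t)))
      ∧ (∀ k v, (cs.foldl (fun (st : PySem.Dict String String × List (String × String)) c =>
            let q := pvQuote c.2
            if P1.contains q && !(st.1.contains q) then
              let sym := "const" ++ PySem.Int.toStr ((st.2.length : Nat) : Int)
              (st.1.insert q sym, st.2 ++ [(sym, c.2)])
            else st) (d, maps)).1.get? k = some v → pvHead v = some 'c') := by
  intro cs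
  induction cs with
  | nil => intro d maps s0 hd; exact ⟨by simp, hd⟩
  | cons c cs ih =>
    intro d maps s0 hd
    have hq : pvHead (pvQuote c.2) = some '"' := pvHead_quote c.2
    have hflag : (P1.map (fun t => d.getD t t)).any (fun t => t == pvQuote c.2)
        = (P1.contains (pvQuote c.2) && !(d.contains (pvQuote c.2))) := by
      rw [Bool.eq_iff_iff]
      simp only [List.any_map, List.any_eq_true, Function.comp, beq_iff_eq,
        Bool.and_eq_true, Bool.not_eq_true', PySem.Dict.contains_eq_isSome_get?,
        Option.isSome_eq_false_iff, Option.isNone_iff_eq_none, List.contains_iff_mem]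
      constructor
      · rintro ⟨t, ht, hgd⟩
        obtain ⟨rfl, hn⟩ := (pv_gd_eq_q d (pvQuote c.2) t hd hq).mp hgd
        exact ⟨ht, hn⟩
      · rintro ⟨hm, hn⟩
        exact ⟨pvQuote c.2, hm, (pv_gd_eq_q d (pvQuote c.2) _ hd hq).mpr ⟨rfl, hn⟩⟩
    by_cases hc : (P1.contains (pvQuote c.2) && !(d.contains (pvQuote c.2))) = true
    · -- matched: assign a fresh symbol
      have hn : d.get? (pvQuote c.2) = none := by
        have := (Bool.and_eq_true _ _).mp hc
        simpa [PySem.Dict.contains_eq_isSome_get?, Option.isSome_eq_false_iff,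
          Option.isNone_iff_eq_none] using this.2
      have hnew : (P1.map (fun t => d.getD t t)).map
            (fun t => if t == pvQuote c.2 then "const" ++ PySem.Int.toStr (maps.length : Int) else t)
          = P1.map (fun t => (d.insert (pvQuote c.2) ("const" ++ PySem.Int.toStr (maps.length : Int))).getD t t) := by
        rw [List.map_map]
        refine List.map_congr_left (fun t _ => ?_)
        simp only [Function.comp]
        rw [PySem.Dict.getD_insert]
        by_cases ht : t = pvQuote c.2
        · rw [ht]
          have hgd : d.getD (pvQuote c.2) (pvQuote c.2) = pvQuote c.2 := by
            rw [PySem.Dict.getD_eq_get?_getD, hn]; rfl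
          simp [hgd]
        · have hne : ¬ d.getD t t = pvQuote c.2 := by
            intro hgd
            exact ht ((pv_gd_eq_q d (pvQuote c.2) t hd hq).mp hgd).1
          simp [hne, ht]
      have hd' : ∀ k v, (d.insert (pvQuote c.2) ("const" ++ PySem.Int.toStr (maps.length : Int))).get? k = some v →
          pvHead v = some 'c' := by
        intro k v hk
        rw [PySem.Dict.get?_insert] at hk
        split at hk
        · cases hk; exact pvHead_sym _
        · exact hd k v hk
      have ih' := ih (d.insert (pvQuote c.2) ("const" ++ PySem.Int.toStr (maps.length : Int)))
        (maps ++ [("const" ++ PySem.Int.toStr (maps.length : Int), c.2)])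
        (P1.map (fun t => (d.insert (pvQuote c.2) ("const" ++ PySem.Int.toStr (maps.length : Int))).getD t t)) hd'
      simp only [List.foldl_cons, pv_pairfold, List.nil_append, Bool.false_or,
        hflag, hc, if_true] at ih' ⊢
      rcases ih' with ⟨h1, h2⟩
      refine ⟨?_, h2⟩
      have hlen : (maps.length : Int) + 1
          = (((maps ++ [("const" ++ PySem.Int.toStr (maps.length : Int), c.2)]).length : Nat) : Int) := by
        simp
      rw [hnew, hlen, h1]
      rcases cs with _ | ⟨c', cs'⟩ <;> simp
    · -- not matched: everything unchanged
      have hid : (P1.map (fun t => d.getD t t)).map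
            (fun t => if t == pvQuote c.2 then "const" ++ PySem.Int.toStr (maps.length : Int) else t)
          = P1.map (fun t => d.getD t t) := by
        rw [List.map_map]
        refine List.map_congr_left (fun t ht => ?_)
        simp only [Function.comp]
        have : ¬ d.getD t t = pvQuote c.2 := by
          intro hgd
          obtain ⟨rfl, hnone⟩ := (pv_gd_eq_q d (pvQuote c.2) t hd hq).mp hgd
          exact hc (by
            simp [ht, PySem.Dict.contains_eq_isSome_get?, hnone])
        simp [this]
      have hc' : (P1.contains (pvQuote c.2) && !(d.contains (pvQuote c.2))) = false :=
        Bool.not_eq_true _ ▸ Bool.eq_false_iff.mpr hc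
      have ih' := ih d maps (P1.map (fun t => d.getD t t)) hd
      simp only [List.foldl_cons, pv_pairfold, List.nil_append, Bool.false_or,
        hflag, hc', if_false, Bool.false_eq_true] at ih' ⊢
      rw [hid]
      rcases ih' with ⟨h1, h2⟩
      refine ⟨?_, h2⟩
      rw [h1]
      rcases cs with _ | ⟨c', cs'⟩ <;> simp

-- ===== VERDICT

-- ===== phase 3 =====

theorem pv_freestep :
    (fun (acc : List String) (tok : String) =>
      if (PySem.Str.pyGet? tok 0 == some '"') && (PySem.Str.pyGet? tok (-1) == some '"') && decide (2 < PySem.Str.len tok) then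
        if acc.contains (PySem.Str.slice tok (some 1) (some (-1))) then acc
        else acc ++ [PySem.Str.slice tok (some 1) (some (-1))]
      else acc)
    = (fun (acc : List String) (tok : String) =>
      if decide (2 < PySem.Str.len tok) && (PySem.Str.pyGet? tok 0 == some '"') && (PySem.Str.pyGet? tok (-1) == some '"')
          && !(acc.contains (PySem.Str.slice tok (some 1) (some (-1)))) then
        acc ++ [PySem.Str.slice tok (some 1) (some (-1))]
      else acc) := by
  funext acc tok
  cases hx : (PySem.Str.pyGet? tok 0 == some '"') <;>
    cases hy : (PySem.Str.pyGet? tok (-1) == some '"') <;>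
    cases hz : decide (2 < PySem.Str.len tok) <;>
    cases hm : acc.contains (PySem.Str.slice tok (some 1) (some (-1))) <;>
    simp

theorem pv_phase3 :
    ∀ (fs : List String) (descp : String) (maps : List (String × String)),
    fs.foldl (fun (st : String × List (String × String) × Int) f =>
        let symbol := "const" ++ PySem.Int.toStr st.2.2
        (PySem.Str.replace st.1 (pvQuote f) symbol, st.2.1 ++ [(symbol, f)], st.2.2 + 1))
      (descp, maps, (maps.length : Int))
      = (let rb := fs.foldl (fun (st : String × List (String × String)) f =>
            let sym := "const" ++ PySem.Int.toStr ((st.2.length : Nat) : Int)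
            (PySem.Str.replace st.1 (pvQuote f) sym, st.2 ++ [(sym, f)])) (descp, maps)
         (rb.1, rb.2, (rb.2.length : Int))) := by
  intro fs
  induction fs with
  | nil => intro d m; rfl
  | cons f fs ih =>
    intro d m
    simp only [List.foldl_cons]
    have hlen : (m.length : Int) + 1
        = (((m ++ [("const" ++ PySem.Int.toStr (m.length : Int), f)]).length : Nat) : Int) := by
      simp
    rw [hlen]
    exact ih _ _

-- empty-dict lookups are the identity
theorem pv_map_getD_empty (L : List String) :
    L.map (fun t => (PySem.Dict.empty : PySem.Dict String String).getD t t) = L := by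
  have : ∀ t : String, (PySem.Dict.empty : PySem.Dict String String).getD t t = t := by
    intro t
    rw [PySem.Dict.getD_eq_get?_getD, PySem.Dict.get?_empty]
    rfl
  simp [this]

theorem pv_hd_empty :
    ∀ (k v : String), (PySem.Dict.empty : PySem.Dict String String).get? k = some v → pvHead v = some 'c' := by
  intro k v h
  rw [PySem.Dict.get?_empty] at h
  cases h

-- ===== VERDICT (by name: the statement is the Claim_ definition above) =====
theorem map_tokens_with_consts_spec : Claim_equal_map_tokens_with_consts := by
  intro tokens consts ints _ _
  simp only [Spec_map_tokens_with_consts, map_tokens_with_consts, map_tokens_with_consts_alt]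
  obtain ⟨h1a, h1b⟩ := pv_phase1 ints consts tokens [] (Or.inl rfl)
  have hF1 : (consts.foldl (fun (st : List String × List String) c =>
      if pvSkipA ints c then st
      else
        let q := st.1.foldl (fun acc tok => acc ++ [if tok == c.2 then pvQuote c.2 else tok]) []
        (q, q)) (tokens, [])).1
      = tokens.map (fun t => consts.foldl (fun t c => if pvSkipA ints c then t
          else if t == c.2 then pvQuote c.2 else t) t) := congrArg Prod.fst h1a
  have hguard1 : (if (consts.foldl (fun (st : List String × List String) c =>
      if pvSkipA ints c then st
      else
        let q := st.1.foldl (fun acc tok => acc ++ [if tok == c.2 then pvQuote c.2 else tok]) []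
        (q, q)) (tokens, [])).2.isEmpty then
        (consts.foldl (fun (st : List String × List String) c =>
      if pvSkipA ints c then st
      else
        let q := st.1.foldl (fun acc tok => acc ++ [if tok == c.2 then pvQuote c.2 else tok]) []
        (q, q)) (tokens, [])).1
      else (consts.foldl (fun (st : List String × List String) c =>
      if pvSkipA ints c then st
      else
        let q := st.1.foldl (fun acc tok => acc ++ [if tok == c.2 then pvQuote c.2 else tok]) []
        (q, q)) (tokens, [])).2)
      = tokens.map (fun t => consts.foldl (fun t c => if pvSkipA ints c then t
          else if t == c.2 then pvQuote c.2 else t) t) := by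
    rcases h1b with h | h
    · rw [h, ← hF1]; simp
    · by_cases he : (consts.foldl (fun (st : List String × List String) c =>
          if pvSkipA ints c then st
          else
            let q := st.1.foldl (fun acc tok => acc ++ [if tok == c.2 then pvQuote c.2 else tok]) []
            (q, q)) (tokens, [])).2.isEmpty
      · rw [if_pos he, hF1]
      · rw [if_neg he, h]
  rw [hguard1]
  have hT : (fun t => consts.foldl (fun t c => if pvSkipA ints c then t
        else if t == c.2 then pvQuote c.2 else t) t)
      = (fun t => ((consts.filter (fun c => !(pvSkipB ints c))).map (·.2)).foldl
          (fun t tgt => if t == tgt then pvQuote tgt else t) t) :=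
    funext (pv_targets ints consts)
  rw [hT]
  have h2 := pv_phase2
    (tokens.map (fun t => ((consts.filter (fun c => !(pvSkipB ints c))).map (·.2)).foldl
        (fun t tgt => if t == tgt then pvQuote tgt else t) t))
    consts PySem.Dict.empty [] [] pv_hd_empty
  rw [pv_map_getD_empty] at h2
  simp only [List.length_nil, Nat.cast_zero] at h2
  rw [h2.1]
  have hguard2 : ∀ (b : Bool) (C : List String),
      (if (if b then ([] : List String) else C).isEmpty then C else (if b then [] else C)) = C := by
    intro b C
    cases b <;> simp
  rw [hguard2]
  rw [pv_freestep, pv_phase3]
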